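-- pv_equiv track=rewrite | github.com/gaplin/Advent_of_Code_2024 | 4/day4p1.py | starting_points
-- ===== SOURCE A (Python) =====
-- def starting_points(grid: list, i: int, j: int, target: str, n: int, m: int, s: int) -> int:
--     directions = [(1, 0), (0, 1), (-1, 0), (0, -1), (1, 1), (1, -1), (-1, 1), (-1, -1)]
--     result = 0
--     for di, dj in directions:
--         new_i = i - di
--         new_j = j - dj
--         match_idx = 0
--         for _ in range(s):
--             new_i += di
--             new_j += dj
--             if new_i < 0 or new_i >= n or new_j < 0 or new_j >= m or grid[new_i][new_j] != target[match_idx]: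
--                 break
--             match_idx += 1
--         else:
--             result += 1
--     return result
-- ===== SOURCE B (Python) =====
-- def starting_points(grid: list, i: int, j: int, target: str, n: int, m: int, s: int) -> int:
--     # Swapped loop nest: iterate over the step index k and prune a survivor
--     # list of directions; count the directions that survive all s rounds.
--     alive = [(1, 0), (0, 1), (-1, 0), (0, -1), (1, 1), (1, -1), (-1, 1), (-1, -1)]
--     for k in range(s):
--         if not alive:
--             break
--         alive = [(di, dj) for (di, dj) in alive
--                  if 0 <= i + k * di < n and 0 <= j + k * dj < m
--                  and grid[i + k * di][j + k * dj] == target[k]]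
--     return len(alive)
-- ===== Notes on version B (the rewrite author's own statement) =====
-- stated objective: alternative
-- what changed: B swaps the loop nest: instead of walking each of the 8 directions to completion with an interleaved per-step bounds check and early break (for-else), it iterates over the step index k and prunes one survivor list of directions, keeping at round k only the directions whose cell (i+k*di, j+k*dj) is in bounds and matches target[k], and returns the number of directions surviving all s rounds.
-- outside the precondition, e.g. on starting_points(['xy', 'z'], 0, 0, 'ab', 2, 2, 2): A returns 0, B returns 0; on starting_points(['ab'], 0, 0, 'zz', 2, 2, 2): A returns 0, B returns 0; on starting_points(['a'], 0, 0, 'a', 1, 1, 2): A returns 0, B returns 0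
import Mathlib
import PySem

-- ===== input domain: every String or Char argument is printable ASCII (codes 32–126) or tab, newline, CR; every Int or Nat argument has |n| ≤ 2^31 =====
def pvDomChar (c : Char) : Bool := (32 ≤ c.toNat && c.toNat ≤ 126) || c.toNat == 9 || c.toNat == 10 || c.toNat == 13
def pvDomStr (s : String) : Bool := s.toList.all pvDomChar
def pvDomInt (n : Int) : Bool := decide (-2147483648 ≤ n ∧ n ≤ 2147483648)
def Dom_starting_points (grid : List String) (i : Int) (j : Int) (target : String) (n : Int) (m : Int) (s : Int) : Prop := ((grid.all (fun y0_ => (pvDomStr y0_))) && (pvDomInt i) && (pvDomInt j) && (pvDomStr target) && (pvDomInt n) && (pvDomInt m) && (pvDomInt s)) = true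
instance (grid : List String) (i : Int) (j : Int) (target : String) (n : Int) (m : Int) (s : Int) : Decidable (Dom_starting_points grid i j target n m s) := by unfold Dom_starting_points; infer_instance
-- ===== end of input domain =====

-- B swaps A's loop nest: instead of walking each direction with an interleaved bounds check and
-- early break, it prunes one survivor list of directions per step index k and counts survivors
-- (alternative decomposition, same cost). Cell/char accesses are totalized with a default in the
-- ports; they are exact wherever Python does not raise (Pre_).

-- ===== PORT A =====
-- grid[r][c] (totalized with defaults; under Pre_ every evaluated access is in range, where it is exact)
def pvGridAt (grid : List String) (r c : Int) : Char :=
  (PySem.Str.pyGet? ((PySem.List.pyGet? grid r).getD "") c).getD ' '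

-- target[k] (totalized; exact under Pre_)
def pvTgtAt (target : String) (k : Int) : Char :=
  (PySem.Str.pyGet? target k).getD ' '

def pvDirs : List (Int × Int) :=
  [(1, 0), (0, 1), (-1, 0), (0, -1), (1, 1), (1, -1), (-1, 1), (-1, -1)]

-- the inner 'for _ in range(s): … break / else' loop of A: true ↔ the loop completed without break
def pvLoopA (grid : List String) (target : String) (n m di dj : Int) :
    Nat → Int → Int → Int → Bool
  | 0, _, _, _ => true
  | fuel+1, ni, nj, mi =>
    if ni + di < 0 ∨ ni + di ≥ n ∨ nj + dj < 0 ∨ nj + dj ≥ m ∨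
        pvGridAt grid (ni + di) (nj + dj) ≠ pvTgtAt target mi then
      false
    else
      pvLoopA grid target n m di dj fuel (ni + di) (nj + dj) (mi + 1)

def starting_points (grid : List String) (i : Int) (j : Int) (target : String) (n : Int) (m : Int) (s : Int) : Int :=
  pvDirs.foldl (fun result d =>
    if pvLoopA grid target n m d.1 d.2 s.toNat (i - d.1) (j - d.2) 0 then result + 1
    else result) 0

-- ===== PORT B =====
-- the filter predicate of round k of B's comprehension
def pvStep (grid : List String) (target : String) (n m i j k : Int) (d : Int × Int) : Bool :=
  decide (0 ≤ i + k * d.1) && decide (i + k * d.1 < n) &&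
  decide (0 ≤ j + k * d.2) && decide (j + k * d.2 < m) &&
  (pvGridAt grid (i + k * d.1) (j + k * d.2) == pvTgtAt target k)

-- B's 'for k in range(s)' loop: prune the survivor list once per round
def pvPrune (grid : List String) (target : String) (n m i j : Int) :
    Nat → Int → List (Int × Int) → List (Int × Int)
  | 0, _, alive => alive
  | fuel+1, k, alive =>
    if alive.isEmpty then alive
    else pvPrune grid target n m i j fuel (k + 1) (alive.filter (pvStep grid target n m i j k))

def starting_points_alt (grid : List String) (i : Int) (j : Int) (target : String) (n : Int) (m : Int) (s : Int) : Int :=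
  ((pvPrune grid target n m i j s.toNat 0 pvDirs).length : Int)

-- ===== PRECONDITION & SPEC =====
-- Pre_ excludes inputs on which Python A can hit an out-of-range access and raise IndexError:
-- when A actually probes (s > 0 and the start cell (i,j) lies in [0,n)x[0,m)) it demands a target
-- of length >= s, at least n rows, and rows of length >= m among the first n; when A never probes
-- (s <= 0 or start out of bounds: every direction breaks at step 0) nothing is required.
-- It is conservative: on some excluded inputs A still returns (an earlier mismatch or bounds break
-- stops the loop before the out-of-range access is reached); see the cited examples.
def Pre_starting_points (grid : List String) (i : Int) (j : Int) (target : String) (n : Int) (m : Int) (s : Int) : Prop :=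
  (0 < s ∧ 0 ≤ i ∧ i < n ∧ 0 ≤ j ∧ j < m) →
  (s ≤ (target.toList.length : Int) ∧ n ≤ (grid.length : Int) ∧
    ∀ row ∈ grid.take n.toNat, m ≤ (row.toList.length : Int))
instance (grid : List String) (i : Int) (j : Int) (target : String) (n : Int) (m : Int) (s : Int) : Decidable (Pre_starting_points grid i j target n m s) := by unfold Pre_starting_points; infer_instance

def pvWitness_starting_points : List String × Int × Int × String × Int × Int × Int :=
  (["ab", "ba"], 0, 0, "ab", 2, 2, 2)

def Spec_starting_points (grid : List String) (i : Int) (j : Int) (target : String) (n : Int) (m : Int) (s : Int) (out : Int) : Prop := out = starting_points_alt grid i j target n m s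
instance (grid : List String) (i : Int) (j : Int) (target : String) (n : Int) (m : Int) (s : Int) (out : Int) : Decidable (Spec_starting_points grid i j target n m s out) := by unfold Spec_starting_points; infer_instance

-- ===== CLAIM (what is proved, stated in full; the proofs are below) =====
def Claim_equal_starting_points : Prop := ∀ (grid : List String) (i : Int) (j : Int) (target : String) (n : Int) (m : Int) (s : Int), Dom_starting_points grid i j target n m s → Pre_starting_points grid i j target n m s → Spec_starting_points grid i j target n m s (starting_points grid i j target n m s)

-- ===== LEMMAS AND PROOFS =====

-- proof-only: a direction survives all rounds k, k+1, …, k+fuel-1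
def pvAllSteps (grid : List String) (target : String) (n m i j : Int) :
    Nat → Int → (Int × Int) → Bool
  | 0, _, _ => true
  | fuel+1, k, d => pvStep grid target n m i j k d && pvAllSteps grid target n m i j fuel (k + 1) d

lemma pvPrune_eq_filter (grid : List String) (target : String) (n m i j : Int) :
    ∀ (fuel : Nat) (k : Int) (alive : List (Int × Int)),
      pvPrune grid target n m i j fuel k alive
        = alive.filter (pvAllSteps grid target n m i j fuel k) := by
  intro fuel
  induction fuel with
  | zero => intro k alive; simp [pvPrune, pvAllSteps]
  | succ fuel ih =>
    intro k alive
    rw [pvPrune]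
    by_cases he : alive.isEmpty
    · rw [if_pos he]
      rw [List.isEmpty_iff] at he
      subst he
      simp
    · rw [if_neg he, ih, List.filter_filter]
      apply List.filter_congr
      intro d _
      simp [pvAllSteps, Bool.and_comm]

lemma pvLoopA_eq_allSteps (grid : List String) (target : String) (n m i j di dj : Int) :
    ∀ (fuel : Nat) (k : Int),
      pvLoopA grid target n m di dj fuel (i + (k - 1) * di) (j + (k - 1) * dj) k
        = pvAllSteps grid target n m i j fuel k (di, dj) := by
  intro fuel
  induction fuel with
  | zero => intro k; simp [pvLoopA, pvAllSteps]
  | succ fuel ih =>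
    intro k
    have e1 : i + (k - 1) * di + di = i + k * di := by ring
    have e2 : j + (k - 1) * dj + dj = j + k * dj := by ring
    have e1' : i + k * di = i + ((k + 1) - 1) * di := by ring
    have e2' : j + k * dj = j + ((k + 1) - 1) * dj := by ring
    rw [pvLoopA, pvAllSteps, e1, e2]
    by_cases h : i + k * di < 0 ∨ i + k * di ≥ n ∨ j + k * dj < 0 ∨ j + k * dj ≥ m ∨
        pvGridAt grid (i + k * di) (j + k * dj) ≠ pvTgtAt target k
    · rw [if_pos h]
      have hstep : pvStep grid target n m i j k (di, dj) = false := by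
        unfold pvStep
        simp only [Bool.and_eq_false_iff, decide_eq_false_iff_not, not_le, not_lt, beq_eq_false_iff_ne]
        rcases h with h | h | h | h | h
        · left; left; left; left; omega
        · left; left; left; right; omega
        · left; left; right; omega
        · left; right; omega
        · right; exact h
      rw [hstep, Bool.false_and]
    · rw [if_neg h]
      push_neg at h
      obtain ⟨h1, h2, h3, h4, h5⟩ := h
      have hstep : pvStep grid target n m i j k (di, dj) = true := by
        unfold pvStep
        simp only [Bool.and_eq_true, decide_eq_true_eq, beq_iff_eq]
        exact ⟨⟨⟨⟨h1, h2⟩, h3⟩, h4⟩, h5⟩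
      rw [hstep, Bool.true_and]
      rw [e1', e2']
      exact ih (k + 1)

lemma foldl_count (p : Int × Int → Bool) :
    ∀ (l : List (Int × Int)) (acc : Int),
      l.foldl (fun r d => if p d then r + 1 else r) acc = acc + ((l.filter p).length : Int) := by
  intro l
  induction l with
  | nil => intro acc; simp
  | cons x xs ih =>
    intro acc
    by_cases hx : p x = true
    · simp [List.foldl, hx, ih]; ring
    · simp [List.foldl, hx, ih]

-- ===== VERDICT (by name: the statement is the Claim_ definition above) =====
theorem starting_points_spec : Claim_equal_starting_points := by
  intro grid i j target n m s _ _
  unfold Spec_starting_points starting_points starting_points_alt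
  rw [foldl_count, pvPrune_eq_filter, zero_add]
  congr 1
  have hf : List.filter (fun d : Int × Int =>
        pvLoopA grid target n m d.1 d.2 s.toNat (i - d.1) (j - d.2) 0) pvDirs
      = List.filter (pvAllSteps grid target n m i j s.toNat 0) pvDirs := by
    apply List.filter_congr
    intro d _
    have e1 : i - d.1 = i + (0 - 1) * d.1 := by ring
    have e2 : j - d.2 = j + (0 - 1) * d.2 := by ring
    rw [e1, e2, pvLoopA_eq_allSteps grid target n m i j d.1 d.2 s.toNat 0]
  rw [hf]
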